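-- pv_equiv track=rewrite | github.com/log2bits/chisel | count_colors.py | rle_size
-- ===== SOURCE A (Python) =====
-- def rle_size(indices):
--     if not indices: return 0
--     size, i = 0, 0
--     while i < len(indices):
--         run = 1
--         while i + run < len(indices) and indices[i+run] == indices[i] and run < 255:
--             run += 1
--         size += 2
--         i += run
--     return size
-- ===== SOURCE B (Python) =====
-- def rle_size(indices):
--     total = 0
--     prev = object()
--     run = 0
--     for x in indices:
--         if x == prev:
--             run += 1
--         else:
--             total += (run + 254) // 255
--             prev, run = x, 1
--     total += (run + 254) // 255
--     return 2 * total
-- ===== Notes on version B (the rewrite author's own statement) =====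
-- stated objective: simpler
-- what changed: Replaces A's nested while loops over indices (inner loop advancing a 255-capped run by repeated increments) with a single flat pass that counts each maximal group's length and adds the closed-form ceil-division (run+254)//255 per group, returning twice the chunk total.
import Mathlib
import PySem

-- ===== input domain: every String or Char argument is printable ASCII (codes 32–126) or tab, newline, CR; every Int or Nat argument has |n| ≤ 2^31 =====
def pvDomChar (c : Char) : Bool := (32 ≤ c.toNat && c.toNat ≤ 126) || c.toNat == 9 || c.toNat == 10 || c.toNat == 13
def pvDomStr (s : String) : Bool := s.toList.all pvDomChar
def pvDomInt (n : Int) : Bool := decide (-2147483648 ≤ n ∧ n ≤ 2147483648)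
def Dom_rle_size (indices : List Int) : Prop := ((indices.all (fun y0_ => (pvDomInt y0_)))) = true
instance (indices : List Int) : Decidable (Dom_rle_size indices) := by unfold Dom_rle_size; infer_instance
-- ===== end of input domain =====

set_option maxRecDepth 8000


-- B replaces A's nested run-advancing loops with one flat pass using a closed-form
-- ceil-division per maximal group (objective: simpler; same return value, no side effects).

-- ===== PORT A =====
-- inner while: `while i + run < len(indices) and indices[i+run] == indices[i] and run < 255: run += 1`
def rleInner (indices : List Int) (i run : Nat) : Nat :=
  if i + run < indices.length ∧ indices.getD (i + run) 0 = indices.getD i 0 ∧ run < 255 then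
    rleInner indices i (run + 1)
  else run
termination_by 255 - run
decreasing_by omega

-- the inner loop advances `i` by at least 1 (cited by outer loop's termination)
theorem rleInner_ge (indices : List Int) (i run : Nat) : run ≤ rleInner indices i run := by
  fun_induction rleInner with
  | case1 => omega
  | case2 => omega

-- outer while: `while i < len(indices): run = <inner>; size += 2; i += run`
def rleOuter (indices : List Int) (i : Nat) (size : Int) : Int :=
  if i < indices.length then rleOuter indices (i + rleInner indices i 1) (size + 2) else size
termination_by indices.length - i
decreasing_by have := rleInner_ge indices i 1; omega

def rle_size (indices : List Int) : Int :=
  if indices = [] then 0 else rleOuter indices 0 0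

-- ===== PORT B =====
def rle_size_alt (indices : List Int) : Int :=
  let st := indices.foldl
    (fun (st : Int × Option Int × Int) x =>
      if some x = st.2.1 then (st.1, st.2.1, st.2.2 + 1)
      else (st.1 + PySem.Int.floordiv (st.2.2 + 254) 255, some x, 1))
    (0, none, 0)
  2 * (st.1 + PySem.Int.floordiv (st.2.2 + 254) 255)

-- ===== PRECONDITION & SPEC =====
def Spec_rle_size (indices : List Int) (out : Int) : Prop := out = rle_size_alt indices
instance (indices : List Int) (out : Int) : Decidable (Spec_rle_size indices out) := by unfold Spec_rle_size; infer_instance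

-- ===== CLAIM (what is proved, stated in full; the proofs are below) =====
def Claim_equal_rle_size : Prop := ∀ (indices : List Int), Dom_rle_size indices → Spec_rle_size indices (rle_size indices)

-- ===== LEMMAS AND PROOFS =====

-- chunk count per maximal group, in Nat (the common reference value)
def chunksN : List Int → Nat
  | [] => 0
  | x :: xs =>
      ((xs.takeWhile (· == x)).length + 255) / 255 + chunksN (xs.dropWhile (· == x))
termination_by l => l.length
decreasing_by simpa using Nat.lt_succ_of_le (List.length_dropWhile_le _ _)

-- iteration count of A's outer loop on a suffix
def gN : List Int → Nat
  | [] => 0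
  | x :: xs =>
      1 + gN (List.drop (min ((xs.takeWhile (· == x)).length + 1) 255 - 1) xs)
termination_by l => l.length
decreasing_by simp [List.length_drop]

theorem rleInner_eq (l : List Int) (i run : Nat) :
    run ≤ 255 →
    rleInner l i run =
      min (run + (List.takeWhile (· == l.getD i 0) (l.drop (i + run))).length) 255 := by
  fun_induction rleInner l i run with
  | case1 run hcond ih =>
    intro hle
    obtain ⟨h1, h2, h3⟩ := hcond
    rw [ih (by omega)]
    rw [List.drop_eq_getElem_cons h1]
    rw [List.takeWhile_cons_of_pos (by
      simp only [beq_iff_eq]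
      rw [← List.getD_eq_getElem l 0 h1]; exact h2)]
    simp only [List.length_cons]
    have : i + run + 1 = i + (run + 1) := by omega
    rw [this]
    omega
  | case2 run hcond =>
    intro hle
    by_cases h1 : i + run < l.length
    · by_cases h2 : l.getD (i + run) 0 = l.getD i 0
      · have h3 : run = 255 := by omega
        omega
      · rw [List.drop_eq_getElem_cons h1]
        rw [List.takeWhile_cons_of_neg (by
          simp only [beq_iff_eq]
          rw [← List.getD_eq_getElem l 0 h1]; exact h2)]
        simp; omega
    · rw [List.drop_eq_nil_of_le (by omega)]
      simp; omega

theorem rleOuter_eq (l : List Int) (i : Nat) (size : Int) :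
    rleOuter l i size = size + 2 * (gN (l.drop i) : Int) := by
  fun_induction rleOuter l i size with
  | case1 i size h ih =>
    rw [ih]
    rw [List.drop_eq_getElem_cons h]
    rw [gN]
    have hg : l.getD i 0 = l[i] := List.getD_eq_getElem l 0 h
    set t := (List.takeWhile (· == l[i]) (l.drop (i + 1))).length with ht
    have hr : rleInner l i 1 = min (1 + t) 255 := by
      rw [rleInner_eq l i 1 (by omega), hg]
    have hr1 : 1 ≤ rleInner l i 1 := rleInner_ge l i 1
    have hdd : List.drop (min (t + 1) 255 - 1) (l.drop (i + 1)) = l.drop (i + rleInner l i 1) := by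
      rw [List.drop_drop]
      congr 1
      omega
    rw [hdd]
    push_cast
    ring
  | case2 i size h =>
    rw [List.drop_eq_nil_of_le (by omega)]
    simp [gN]

theorem takeWhile_dropWhile_nil {α : Type} (p : α → Bool) (l : List α) :
    List.takeWhile p (List.dropWhile p l) = [] := by
  induction l with
  | nil => rfl
  | cons x xs ih =>
    by_cases h : p x
    · rw [List.dropWhile_cons_of_pos h]; exact ih
    · rw [List.dropWhile_cons_of_neg h, List.takeWhile_cons_of_neg h]

theorem dropWhile_dropWhile {α : Type} (p : α → Bool) (l : List α) :
    List.dropWhile p (List.dropWhile p l) = List.dropWhile p l := by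
  induction l with
  | nil => rfl
  | cons x xs ih =>
    by_cases h : p x
    · rw [List.dropWhile_cons_of_pos h]; exact ih
    · rw [List.dropWhile_cons_of_neg h, List.dropWhile_cons_of_neg h]

theorem takeWhile_replicate_append {α : Type} (p : α → Bool) (x : α) (hp : p x = true)
    (n : Nat) (r : List α) :
    List.takeWhile p (List.replicate n x ++ r) = List.replicate n x ++ List.takeWhile p r := by
  induction n with
  | zero => simp
  | succ n ih =>
    rw [List.replicate_succ, List.cons_append, List.takeWhile_cons_of_pos hp, ih,
      List.cons_append]

theorem dropWhile_replicate_append {α : Type} (p : α → Bool) (x : α) (hp : p x = true)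
    (n : Nat) (r : List α) :
    List.dropWhile p (List.replicate n x ++ r) = List.dropWhile p r := by
  induction n with
  | zero => simp
  | succ n ih =>
    rw [List.replicate_succ, List.cons_append, List.dropWhile_cons_of_pos hp, ih]

theorem takeWhile_eq_replicate (x : Int) (xs : List Int) :
    List.takeWhile (· == x) xs = List.replicate (List.takeWhile (· == x) xs).length x := by
  apply List.eq_replicate_of_mem
  intro b hb
  have h2 := List.mem_takeWhile_imp hb
  simp only [beq_iff_eq] at h2
  exact h2

theorem gN_eq_chunksN (l : List Int) : gN l = chunksN l := by
  fun_induction gN l with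
  | case1 => simp [chunksN]
  | case2 x xs ih =>
    rw [chunksN]
    set t := (List.takeWhile (· == x) xs).length with ht
    have hrep := takeWhile_eq_replicate x xs
    have hsplit : xs = List.replicate t x ++ List.dropWhile (· == x) xs := by
      conv_lhs => rw [← List.takeWhile_append_dropWhile (p := (· == x)) (l := xs)]
      rw [← hrep]
    set rest := List.dropWhile (· == x) xs with hrest
    by_cases hc : t ≤ 254
    · have hmin : min (t + 1) 255 - 1 = t := by omega
      have hdrop : List.drop t xs = rest := by
        conv_lhs => rw [hsplit]
        rw [List.drop_left' (by simp)]
      rw [hmin, hdrop] at ih ⊢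
      rw [ih]
      have : chunksN rest = chunksN (List.dropWhile (· == x) rest) := by
        rw [hrest, dropWhile_dropWhile]
      have htw : (List.takeWhile (· == x) rest).length = 0 := by
        rw [hrest, takeWhile_dropWhile_nil]; rfl
      cases hrestc : rest with
      | nil => simp [chunksN]; omega
      | cons y ys =>
        omega
    · -- t ≥ 255 : the outer loop chops off a 255-chunk and stays inside the group
      have hmin : min (t + 1) 255 - 1 = 254 := by omega
      have hsplit2 : xs = List.replicate 254 x ++ (List.replicate (t - 254) x ++ rest) := by
        rw [hsplit, ← List.append_assoc, ← List.replicate_add]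
        congr 2
        omega
      have hdrop : List.drop 254 xs = List.replicate (t - 254) x ++ rest := by
        conv_lhs => rw [hsplit2]
        rw [List.drop_left' (by simp)]
      have hcons : List.replicate (t - 254) x ++ rest
          = x :: (List.replicate (t - 255) x ++ rest) := by
        have : t - 254 = (t - 255) + 1 := by omega
        rw [this, List.replicate_succ, List.cons_append]
      rw [hmin, hdrop, hcons] at ih ⊢
      rw [ih, chunksN]
      have hpx : ((x == x) : Bool) = true := by simp
      rw [takeWhile_replicate_append (fun y => y == x) x hpx, dropWhile_replicate_append (fun y => y == x) x hpx]
      rw [hrest, takeWhile_dropWhile_nil, dropWhile_dropWhile, ← hrest]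
      simp only [List.append_nil, List.length_replicate]
      omega

theorem fd255 (m : Nat) : PySem.Int.floordiv ((m : Int) + 254) 255 = (((m + 254) / 255 : Nat) : Int) := by
  have h := PySem.Int.floordiv_natCast (m + 254) 255
  have e : ((m + 254 : Nat) : Int) = (m : Int) + 254 := by push_cast; ring
  have e2 : (((255 : Nat)) : Int) = 255 := by norm_num
  rw [e, e2] at h
  exact h

theorem foldB (ys : List Int) : ∀ (total p : Int) (L : Nat),
    (ys.foldl
        (fun (st : Int × Option Int × Int) x =>
          if some x = st.2.1 then (st.1, st.2.1, st.2.2 + 1)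
          else (st.1 + PySem.Int.floordiv (st.2.2 + 254) 255, some x, 1))
        (total, some p, (L : Int))).1
      + PySem.Int.floordiv ((ys.foldl
        (fun (st : Int × Option Int × Int) x =>
          if some x = st.2.1 then (st.1, st.2.1, st.2.2 + 1)
          else (st.1 + PySem.Int.floordiv (st.2.2 + 254) 255, some x, 1))
        (total, some p, (L : Int))).2.2 + 254) 255
    = total + (((L + (ys.takeWhile (· == p)).length + 254) / 255 : Nat) : Int)
        + (chunksN (ys.dropWhile (· == p)) : Int) := by
  induction ys with
  | nil =>
    intro total p L
    simp only [List.foldl_nil, List.takeWhile_nil, List.dropWhile_nil, List.length_nil, chunksN]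
    rw [fd255 L]
    omega
  | cons y ys ih =>
    intro total p L
    simp only [List.foldl_cons]
    by_cases hy : y = p
    · subst hy
      rw [if_pos rfl]
      have h1 : ((L : Int) + 1) = (((L + 1 : Nat)) : Int) := by push_cast; ring
      rw [h1, ih total y (L + 1)]
      rw [List.takeWhile_cons_of_pos (by simp), List.dropWhile_cons_of_pos (by simp)]
      simp only [List.length_cons]
      have : L + 1 + (List.takeWhile (· == y) ys).length = L + ((List.takeWhile (· == y) ys).length + 1) := by omega
      rw [this]
    · rw [if_neg (by simpa using hy)]
      have ih' := ih (total + PySem.Int.floordiv ((L : Int) + 254) 255) y 1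
      rw [Nat.cast_one] at ih'
      rw [ih']
      rw [List.takeWhile_cons_of_neg (by simpa using hy),
        List.dropWhile_cons_of_neg (by simpa using hy)]
      rw [chunksN, fd255 L]
      push_cast [List.length_nil]
      omega

theorem alt_eq_chunksN (l : List Int) : rle_size_alt l = 2 * (chunksN l : Int) := by
  cases l with
  | nil => simp [rle_size_alt, chunksN, PySem.Int.floordiv]
  | cons x xs =>
    unfold rle_size_alt
    simp only [List.foldl_cons, if_neg (by simp : ¬ (some x = (none : Option Int)))]
    have h254 : (0 : Int) + PySem.Int.floordiv (0 + 254) 255 = 0 := by decide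
    rw [h254]
    have hf := foldB xs 0 x 1
    rw [Nat.cast_one] at hf
    rw [hf, chunksN]
    push_cast
    omega

-- ===== VERDICT (by name: the statement is the Claim_ definition above) =====
theorem rle_size_spec : Claim_equal_rle_size := by
  intro l _
  unfold Spec_rle_size
  rw [alt_eq_chunksN]
  unfold rle_size
  split
  · subst l; simp [chunksN]
  · rw [rleOuter_eq, gN_eq_chunksN]; simp
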